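-- pv_equiv track=rewrite | github.com/lhndsp/ps-turingUSP | 1_logica/desafio.py | countGrupos
-- ===== SOURCE A (Python) =====
-- def countGrupos(grafo):
--     """
--     Contagem de micro grupos no grafo fazendo um loop por cada membro e
--     verificando na sua lista de amizades se possui algum vinculo com o membro anterior
--     no loop ou com alguns dos gruposa anteriores ja visitados, caso possua nao faz nada
--     pois ainda é considerado um grupo de conexoes, caso o contrario incrementa a contagem de
--     grupos, caso seja uma lsita vazia incrementa a contagem tambem pois é considerado como
--     um micro grupo
--
--     Entrada:
--         grafo (dict) -> {'vertice 1':[conexao 1, conexao 2, ..., conexao n], ...,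
--                          'vertice n':[conexao 1, conexao 2, ..., conexao n]}
--                         criado em preencheGrafo()
--     Saida:
--         (int) -> Numero de grupos
--     """
--
--     ligacoes = []
--     lista_auxiliar = [] # A lista auxiliar vai guardar todos os grupos que ja foram visitados
--
--     # cria uma lista de lista com os membros se suas conexoes
--     # tipo: [[vertice 1, conexao 1, conexao 2, ..., conexao n] ...]
--     # assim o vertice (membro) é incluso na verificação de conexoes
--     for i, item in enumerate(grafo):
--         ligacoes.append(grafo[item])
--         ligacoes[i].append(item)
--
--     grupos = 0
--
--     for i, ligacao in enumerate(ligacoes):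
--
--         # No caso de membros isolados incrementa a variavel como um microgrupo
--         if ligacao == []:
--             grupos += 1
--
--         else:
--             # como é o primeiro indice nao compra com anterior e ja incrementa grupos
--             if i == 0:
--                 grupos += 1
--             else:
--                 # verifica se ha itens em comum entre o grupo visitado agora e o anterior ou entre o grupo visitado agora
--                 # e algum dos grupos ja visitados antes, pois assim evita um contagem em grupos em exesso por ter declarado
--                 # uma conexao no comeco e uma outra conexao do mesmo grupo no fim dos inputs por exemplo
--                 if any(item in ligacao for item in ligacoes[i-1]) or any(item in ligacao for item in lista_auxiliar):
--                     pass
--                 else: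
--                     grupos += 1
--
--         # adiciona o grupo visitado a lista de backup
--         lista_auxiliar.extend(ligacao)
--
--     return grupos
-- ===== SOURCE B (Python) =====
-- def countGrupos(grafo):
--     """Two staged passes instead of A's per-node scans over all earlier groups:
--     build each member's group (adjacency list plus the member), index every
--     element by the group where it FIRST occurs, then count the groups all of
--     whose elements first occur there. Such groups are exactly those disjoint
--     from everything before them, which is what A counts. Unlike A, does not
--     mutate grafo's adjacency lists."""
--     groups = [amigos + [v] for v, amigos in grafo.items()]
--     first = {}
--     for i, g in enumerate(groups):
--         for x in g:
--             first.setdefault(x, i)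
--     return sum(1 for i, g in enumerate(groups) if all(first[x] == i for x in g))
-- ===== Notes on version B (the rewrite author's own statement) =====
-- stated objective: faster
-- what changed: Instead of A's one pass that scans the previous group and the ever-growing lista_auxiliar under each node, B builds a first-occurrence index (element -> index of the first group containing it) in one staged pass and then counts the groups all of whose elements first occur there; B also does not mutate grafo's adjacency lists, while A appends each key to its own list in place. Pre_ excludes association lists with duplicate keys, which do not represent a Python dict.
import Mathlib
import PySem

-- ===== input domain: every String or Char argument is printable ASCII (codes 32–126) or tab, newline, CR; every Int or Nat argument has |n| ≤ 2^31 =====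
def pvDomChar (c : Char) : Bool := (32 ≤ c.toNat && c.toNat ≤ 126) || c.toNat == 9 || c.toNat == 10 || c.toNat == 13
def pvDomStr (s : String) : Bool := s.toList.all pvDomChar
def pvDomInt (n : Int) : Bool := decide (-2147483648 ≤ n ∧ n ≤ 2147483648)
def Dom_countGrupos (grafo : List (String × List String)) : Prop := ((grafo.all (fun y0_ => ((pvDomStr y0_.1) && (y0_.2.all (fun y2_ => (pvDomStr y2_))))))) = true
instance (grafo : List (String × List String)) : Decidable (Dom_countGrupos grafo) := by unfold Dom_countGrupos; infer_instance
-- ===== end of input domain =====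

-- B replaces A's per-node scans over all earlier groups by two staged passes: a
-- first-occurrence index (element -> first group containing it) is built once, then a
-- group counts iff all its elements first occur there; return values coincide.
-- NOTE: the Python A mutates grafo's adjacency lists in place (appends each key);
-- B does not — the equivalence proved here is about the RETURN value only.

-- ===== PORT A =====
-- body of A's second loop, one iteration (branches in A's order); ligacoes is the full list A indexes into
def countGruposStep (ligacoes : List (List String)) (st : Int × List String) (p : Int × List String) : Int × List String :=
  let grupos :=
    if p.2 = [] then st.1 + 1
    else if p.1 = 0 then st.1 + 1
    else if (PySem.List.pyGetD ligacoes (p.1 - 1) []).any (fun item => p.2.contains item)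
            || st.2.any (fun item => p.2.contains item) then st.1
    else st.1 + 1
  (grupos, st.2 ++ p.2)

def countGrupos (grafo : List (String × List String)) : Int :=
  -- first loop: ligacoes.append(grafo[item]); ligacoes[i].append(item)
  let ligacoes := grafo.foldl (fun lig item => lig ++ [PySem.Dict.getD ⟨grafo⟩ item.1 [] ++ [item.1]]) []
  -- second loop over enumerate(ligacoes), state (grupos, lista_auxiliar)
  ((PySem.List.enumerate ligacoes 0).foldl (countGruposStep ligacoes) (0, [])).1

-- ===== PORT B =====
-- inner loop of B's first pass: for x in g: first.setdefault(x, i)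
def firstOccStep (d : PySem.Dict String Int) (p : Int × List String) : PySem.Dict String Int :=
  p.2.foldl (fun d x => PySem.Dict.setdefault d x p.1) d

def countGrupos_alt (grafo : List (String × List String)) : Int :=
  -- groups = [amigos + [v] for v, amigos in grafo.items()]
  let groups := grafo.map (fun p => p.2 ++ [p.1])
  -- first pass: first-occurrence index
  let first := (PySem.List.enumerate groups 0).foldl firstOccStep PySem.Dict.empty
  -- second pass: sum(1 for i, g in enumerate(groups) if all(first[x] == i for x in g))
  -- (first[x] never raises: every x of g was inserted in the first pass; getD's default is never read)
  (PySem.List.enumerate groups 0).foldl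
    (fun acc p => if p.2.all (fun x => PySem.Dict.getD first x (-1) == p.1) then acc + 1 else acc) 0

-- ===== PRECONDITION & SPEC =====
-- Pre_ excludes association lists with duplicate keys: they do not represent a Python
-- dict (A's parameter), so neither behaviour there is A's; A's port would read the
-- first value for every duplicate occurrence.
def Pre_countGrupos (grafo : List (String × List String)) : Prop := (grafo.map Prod.fst).Nodup
instance (grafo : List (String × List String)) : Decidable (Pre_countGrupos grafo) := by unfold Pre_countGrupos; infer_instance
def pvWitness_countGrupos : (List (String × List String)) := [("a", ["b"]), ("c", []), ("d", ["b"])]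

def Spec_countGrupos (grafo : List (String × List String)) (out : Int) : Prop := out = countGrupos_alt grafo
instance (grafo : List (String × List String)) (out : Int) : Decidable (Spec_countGrupos grafo out) := by unfold Spec_countGrupos; infer_instance

-- ===== CLAIM (what is proved, stated in full; the proofs are below) =====
def Claim_equal_countGrupos : Prop := ∀ (grafo : List (String × List String)), Dom_countGrupos grafo → Pre_countGrupos grafo → Spec_countGrupos grafo (countGrupos grafo)

-- ===== LEMMAS AND PROOFS =====

-- the simple fold A reduces to: count a group iff no element was seen before, then extend the seen list
def stepS (st : Int × List String) (lig : List String) : Int × List String :=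
  ((if st.2.any (fun item => lig.contains item) then st.1 else st.1 + 1), st.2 ++ lig)

-- step 1: under Nodup keys the first loop builds exactly grafo.map (fun p => p.2 ++ [p.1])
lemma ligacoes_eq (grafo : List (String × List String)) (h : (grafo.map Prod.fst).Nodup) :
    grafo.foldl (fun lig item => lig ++ [PySem.Dict.getD ⟨grafo⟩ item.1 [] ++ [item.1]]) []
      = grafo.map (fun p => p.2 ++ [p.1]) := by
  rw [PySem.List.foldl_append_singleton_eq_map]
  simp only [List.nil_append]
  apply List.map_congr_left
  intro p hp
  rw [PySem.Dict.getD_of_mem_items ⟨grafo⟩ (by simpa using hp) (by simpa using h) []]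

-- step 2: A's enumerate-fold equals the simple fold (the i-1 check is subsumed by lista_auxiliar)
lemma foldA (L : List (List String)) :
    ∀ (rest done : List (List String)) (g : Int), done ++ rest = L →
      (PySem.List.enumerate rest (done.length : Int)).foldl (countGruposStep L) (g, done.flatten)
        = rest.foldl stepS (g, done.flatten) := by
  intro rest
  induction rest with
  | nil => intro done g _; simp [PySem.List.enumerate_nil]
  | cons lig rest ih =>
    intro done g hL
    rw [PySem.List.enumerate_cons, List.foldl_cons, List.foldl_cons]
    have hstep : countGruposStep L (g, done.flatten) ((done.length : Int), lig)
        = stepS (g, done.flatten) lig := by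
      simp only [countGruposStep, stepS]
      by_cases hnil : lig = []
      · subst hnil; simp
      · cases done with
        | nil => simp [hnil]
        | cons d ds =>
          have hi0 : ¬ ((((d :: ds).length : Nat) : Int) = 0) := by
            simp only [List.length_cons]; omega
          -- the element at index done.length - 1 is the last element of done, all of whose
          -- elements are in done.flatten; so the first disjunct implies the second
          have hget : PySem.List.pyGetD L (((d :: ds).length : Int) - 1) [] = (d :: ds).getLast (by simp) := by
            have h1 : (((d :: ds).length : Int) - 1) = ((ds.length : Nat) : Int) := by
              simp only [List.length_cons]; push_cast; ring
            rw [h1, PySem.List.pyGetD_natCast]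
            have hlt : ds.length < L.length := by
              subst hL; simp
            rw [List.getD_eq_getElem _ _ hlt]
            subst hL
            rw [List.getElem_append_left (by simp), List.getLast_eq_getElem]
            congr 1
          have hsub : (((d :: ds).getLast (by simp)).any (fun item => lig.contains item)
              || (d :: ds).flatten.any (fun item => lig.contains item))
                = (d :: ds).flatten.any (fun item => lig.contains item) := by
            cases hprev : ((d :: ds).getLast (by simp)).any (fun item => lig.contains item) with
            | false => simp
            | true =>
              simp only [Bool.true_or]
              rw [List.any_eq_true] at hprev
              obtain ⟨x, hx, hcx⟩ := hprev
              have hxf : x ∈ (d :: ds).flatten := List.mem_flatten.2 ⟨_, List.getLast_mem _, hx⟩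
              exact (List.any_eq_true.2 ⟨x, hxf, hcx⟩).symm
          rw [if_neg hnil, if_neg hi0, hget, hsub]
    rw [hstep]
    have hrec := ih (done ++ [lig]) (stepS (g, done.flatten) lig).1 (by simpa using hL)
    have hlen' : ((done ++ [lig]).length : Int) = (done.length : Int) + 1 := by simp
    have hfl : (done ++ [lig]).flatten = done.flatten ++ lig := by simp
    have hsnd : (stepS (g, done.flatten) lig).2 = done.flatten ++ lig := rfl
    rw [hlen', hfl] at hrec
    calc (PySem.List.enumerate rest ((done.length : Int) + 1)).foldl (countGruposStep L) (stepS (g, done.flatten) lig)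
        = (PySem.List.enumerate rest ((done.length : Int) + 1)).foldl (countGruposStep L) ((stepS (g, done.flatten) lig).1, done.flatten ++ lig) := by
          rw [← hsnd]
      _ = rest.foldl stepS ((stepS (g, done.flatten) lig).1, done.flatten ++ lig) := hrec
      _ = rest.foldl stepS (stepS (g, done.flatten) lig) := by rw [← hsnd]

-- step 3a: what the inner setdefault loop leaves in the dict
lemma setdefault_fold_get? (i : Int) (g : List String) :
    ∀ (d : PySem.Dict String Int) (x : String),
      (g.foldl (fun d y => PySem.Dict.setdefault d y i) d).get? x
        = (d.get? x).or (if g.contains x then some i else none) := by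
  induction g with
  | nil => intro d x; cases h : d.get? x <;> simp [h]
  | cons y g ih =>
    intro d x
    rw [List.foldl_cons, ih]
    by_cases hxy : x = y
    · subst hxy
      rw [PySem.Dict.get?_setdefault_self]
      cases h : d.get? x <;> simp_all
    · rw [PySem.Dict.get?_setdefault_of_ne _ _ hxy]
      have : (y :: g).contains x = g.contains x := by
        simp only [List.contains_cons, beq_eq_false_iff_ne.mpr hxy, Bool.false_or]
      rw [this]

-- step 3b: the first pass builds exactly the first-occurrence index (findIdx?)
lemma firstOcc_get? :
    ∀ (rest : List (List String)) (s : Int) (d : PySem.Dict String Int) (x : String),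
      ((PySem.List.enumerate rest s).foldl firstOccStep d).get? x
        = (d.get? x).or ((rest.findIdx? (fun g => g.contains x)).map (fun n => s + n)) := by
  intro rest
  induction rest with
  | nil => intro s d x; cases h : d.get? x <;> simp [PySem.List.enumerate_nil, h]
  | cons g rest ih =>
    intro s d x
    rw [PySem.List.enumerate_cons, List.foldl_cons, ih]
    have hd' : (firstOccStep d (s, g)).get? x
        = (d.get? x).or (if g.contains x then some s else none) :=
      setdefault_fold_get? s g d x
    rw [hd', Option.or_assoc, List.findIdx?_cons]
    congr 1
    by_cases hm : x ∈ g
    · simp [hm]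
    · rw [if_neg (by simpa using hm), if_neg (by simpa using hm), Option.none_or]
      cases rest.findIdx? (fun g => g.contains x) <;> simp
      ring

-- step 3c: a group's elements all first-occur at its own index iff the group is
-- disjoint from everything before it (the guard of stepS)
lemma all_first_eq (done : List (List String)) (lig : List String) (rest : List (List String)) :
    (lig.all (fun x => PySem.Dict.getD
        ((PySem.List.enumerate (done ++ lig :: rest) 0).foldl firstOccStep PySem.Dict.empty) x (-1)
      == ((done.length : Nat) : Int)))
      = !(done.flatten.any (fun item => lig.contains item)) := by
  have hget : ∀ x ∈ lig,
      ((PySem.List.enumerate (done ++ lig :: rest) 0).foldl firstOccStep PySem.Dict.empty).get? x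
        = (((done ++ lig :: rest).findIdx? (fun g => g.contains x)).map (fun n => (0 : Int) + n)) := by
    intro x _
    rw [firstOcc_get?, show (PySem.Dict.empty : PySem.Dict String Int).get? x = none from rfl,
      Option.none_or]
  cases hany : done.flatten.any (fun item => lig.contains item) with
  | true =>
    obtain ⟨it, hitf, hitl⟩ := List.any_eq_true.1 hany
    have hitlig : it ∈ lig := by simpa using hitl
    obtain ⟨gd, hgd, hitgd⟩ := List.mem_flatten.1 hitf
    have hne : done.findIdx? (fun g => g.contains it) ≠ none := by
      intro hnone
      have := (List.findIdx?_eq_none_iff.1 hnone) gd hgd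
      simp [hitgd] at this
    obtain ⟨j, hj⟩ := Option.ne_none_iff_exists'.1 hne
    have hjlt : j < done.length := by
      have := List.findIdx?_eq_some_iff_findIdx_eq.mp hj
      omega
    have hg : ((PySem.List.enumerate (done ++ lig :: rest) 0).foldl firstOccStep PySem.Dict.empty).get? it
        = some ((0 : Int) + j) := by
      rw [hget it hitlig, List.findIdx?_append, hj]
      rfl
    have hpred : (PySem.Dict.getD
        ((PySem.List.enumerate (done ++ lig :: rest) 0).foldl firstOccStep PySem.Dict.empty) it (-1)
      == ((done.length : Nat) : Int)) = false := by
      rw [PySem.Dict.getD_eq_get?_getD, hg]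
      simp only [Option.getD_some, beq_eq_false_iff_ne, ne_eq]
      intro hc
      omega
    simp only [Bool.not_true]
    exact List.all_eq_false.2 ⟨it, hitlig, by simp [hpred]⟩
  | false =>
    simp only [Bool.not_false]
    rw [List.all_eq_true]
    intro x hx
    have hnone : done.findIdx? (fun g => g.contains x) = none := by
      rw [List.findIdx?_eq_none_iff]
      intro gd hgd
      by_contra hc
      have hxgd : x ∈ gd := by simpa using hc
      have hxf : x ∈ done.flatten := List.mem_flatten.2 ⟨gd, hgd, hxgd⟩
      have := (List.any_eq_false.1 hany) x hxf
      simp [hx] at this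
    have hg : ((PySem.List.enumerate (done ++ lig :: rest) 0).foldl firstOccStep PySem.Dict.empty).get? x
        = some ((0 : Int) + (0 + done.length : Nat)) := by
      rw [hget x hx, List.findIdx?_append, hnone, List.findIdx?_cons, if_pos (by simpa using hx)]
      rfl
    rw [PySem.Dict.getD_eq_get?_getD, hg]
    simp

-- step 4: the simple fold equals B's counting pass (with B's first-occurrence dict over the full L)
lemma foldB (L : List (List String)) :
    ∀ (rest done : List (List String)) (g : Int), done ++ rest = L →
      (rest.foldl stepS (g, done.flatten)).1
        = (PySem.List.enumerate rest (done.length : Int)).foldl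
            (fun acc p => if p.2.all (fun x => PySem.Dict.getD
                ((PySem.List.enumerate L 0).foldl firstOccStep PySem.Dict.empty) x (-1) == p.1)
              then acc + 1 else acc) g := by
  intro rest
  induction rest with
  | nil => intro done g _; simp [PySem.List.enumerate_nil]
  | cons lig rest ih =>
    intro done g hL
    rw [List.foldl_cons, PySem.List.enumerate_cons, List.foldl_cons]
    have hall : (lig.all (fun x => PySem.Dict.getD
        ((PySem.List.enumerate L 0).foldl firstOccStep PySem.Dict.empty) x (-1)
      == ((done.length : Nat) : Int))) = !(done.flatten.any (fun item => lig.contains item)) := by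
      rw [← hL]; exact all_first_eq done lig rest
    have hstep : (if lig.all (fun x => PySem.Dict.getD
          ((PySem.List.enumerate L 0).foldl firstOccStep PySem.Dict.empty) x (-1)
        == ((done.length : Nat) : Int)) then g + 1 else g)
        = (stepS (g, done.flatten) lig).1 := by
      rw [hall]
      simp only [stepS]
      cases done.flatten.any (fun item => lig.contains item) <;> simp
    rw [hstep]
    have hsnd : (stepS (g, done.flatten) lig).2 = (done ++ [lig]).flatten := by
      simp [stepS]
    have hrec := ih (done ++ [lig]) (stepS (g, done.flatten) lig).1 (by simpa using hL)
    have hlen' : ((done ++ [lig]).length : Int) = (done.length : Int) + 1 := by simp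
    rw [hlen'] at hrec
    calc (rest.foldl stepS (stepS (g, done.flatten) lig)).1
        = (rest.foldl stepS ((stepS (g, done.flatten) lig).1, (done ++ [lig]).flatten)).1 := by
          rw [← hsnd]
      _ = _ := hrec

-- ===== VERDICT (by name: the statement is the Claim_ definition above) =====
theorem countGrupos_spec : Claim_equal_countGrupos := by
  intro grafo _ hpre
  unfold Spec_countGrupos
  simp only [countGrupos, countGrupos_alt]
  rw [ligacoes_eq grafo hpre]
  have hA := foldA (grafo.map (fun p => p.2 ++ [p.1])) (grafo.map (fun p => p.2 ++ [p.1])) [] 0 rfl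
  simp only [List.length_nil, Nat.cast_zero, List.flatten_nil] at hA
  have hB := foldB (grafo.map (fun p => p.2 ++ [p.1])) (grafo.map (fun p => p.2 ++ [p.1])) [] 0 rfl
  simp only [List.length_nil, Nat.cast_zero, List.flatten_nil] at hB
  rw [hA, hB]
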